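-- pv_equiv track=rewrite | github.com/tac-tac-go/Codewars | Find_next_greater_number_with_disjoint_set_of_digits.py | disjoint_set_of_digits
-- ===== SOURCE A (Python) =====
-- def disjoint_set_of_digits(n):
--     value = n
--     if value==0:
--         return 0
--
--     while True:
--         if len(list(set(list(str(value))) & set(list(str(n)))))==0:
--             return value
--             break
--         value += 1
-- ===== SOURCE B (Python) =====
-- def disjoint_set_of_digits(n):
--     # Greedy digit construction: build the smallest value >= n whose decimal
--     # digits avoid every digit of n, instead of testing n, n+1, n+2, ...
--     if n == 0:
--         return 0
--     used = set()
--     t = abs(n)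
--     while t:
--         used.add(t % 10)
--         t //= 10
--     allowed = [d for d in range(10) if d not in used]
--     if n < 0:
--         # every negative candidate shares '-'; answer is the smallest
--         # single allowed digit (0..9)
--         return allowed[0]
--     m = allowed[0]
--     p = 1
--     while n >= 10 * p:
--         p *= 10
--     lead = n // p
--     head = next((d for d in allowed if d > lead), None)
--     if head is None:
--         # carry: one digit longer, led by the smallest nonzero allowed digit
--         head = next(d for d in allowed if d > 0)
--         p *= 10
--     return head * p + m * (p - 1) // 9
-- ===== Notes on version B (the rewrite author's own statement) =====
-- stated objective: faster
-- what changed: Replaces A's linear scan n, n+1, n+2, ... (re-stringifying and set-intersecting each candidate) with an O(#digits) arithmetic greedy construction: pick the smallest allowed leading digit above n's leading digit (or carry to one more digit) and fill the rest with the smallest allowed digit; Pre_ only excludes inputs on which A never returns (no digit, or for positive n no nonzero digit, is absent from n).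
import Mathlib
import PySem

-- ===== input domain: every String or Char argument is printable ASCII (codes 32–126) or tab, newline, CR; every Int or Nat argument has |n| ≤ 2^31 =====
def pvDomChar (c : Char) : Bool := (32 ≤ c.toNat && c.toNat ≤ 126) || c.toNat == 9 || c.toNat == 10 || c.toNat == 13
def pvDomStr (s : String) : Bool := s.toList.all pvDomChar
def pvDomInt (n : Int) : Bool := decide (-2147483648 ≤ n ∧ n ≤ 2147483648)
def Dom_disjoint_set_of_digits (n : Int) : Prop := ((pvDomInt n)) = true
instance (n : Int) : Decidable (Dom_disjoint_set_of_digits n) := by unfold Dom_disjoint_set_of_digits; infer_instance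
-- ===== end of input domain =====

-- B replaces A's linear candidate scan by an O(#digits) arithmetic greedy construction of the
-- smallest value ≥ n avoiding all digits of n; Pre_ excludes only inputs on which A never returns.


-- ===== PORT A =====
-- 'while True:' made total with fuel; the proof shows the fuel is never exhausted on
-- Dom ∩ Pre_ inputs.  Loop body: literal transliteration of A's check and increment.
def pvLoopA (n : Int) : Nat → Int → Int
  | 0, value => value
  | fuel+1, value =>
    if PySem.Set.len (PySem.Set.inter (PySem.Set.ofList (PySem.Int.toChars value))
        (PySem.Set.ofList (PySem.Int.toChars n))) = 0 then value
    else pvLoopA n fuel (value + 1)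

def disjoint_set_of_digits (n : Int) : Int :=
  let value := n
  if value = 0 then 0 else pvLoopA n 1000000000000 value

-- ===== PORT B =====
-- while t: used.add(t % 10); t //= 10      ('0 < t' instead of 't != 0' only to make the
-- recursion total; the two guards agree on every reachable t, since t starts at |n| ≥ 0)
def pvUsedLoop (t : Int) (used : PySem.Set Int) : PySem.Set Int :=
  if _h : 0 < t then
    pvUsedLoop (PySem.Int.floordiv t 10) (PySem.Set.add used (PySem.Int.mod t 10))
  else used
termination_by t.toNat
decreasing_by
  rw [PySem.Int.floordiv_eq_ediv_of_pos (by norm_num)]; omega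

-- while n >= 10 * p: p *= 10     ('0 < p' is a totality guard; p starts at 1)
def pvPowLoop (n p : Int) : Int :=
  if _h : 0 < p ∧ 10 * p ≤ n then pvPowLoop n (p * 10) else p
termination_by (n + 1 - p).toNat
decreasing_by omega

def disjoint_set_of_digits_alt (n : Int) : Int :=
  if n = 0 then 0 else
  let used := pvUsedLoop |n| PySem.Set.empty
  let allowed := (PySem.List.pyRange 0 10).filter (fun d => !(PySem.Set.contains used d))
  if n < 0 then PySem.List.pyGetD allowed 0 0
  else
    let m := PySem.List.pyGetD allowed 0 0
    let p := pvPowLoop n 1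
    let lead := PySem.Int.floordiv n p
    match allowed.find? (fun d => decide (lead < d)) with
    | some head => head * p + PySem.Int.floordiv (m * (p - 1)) 9
    | none =>
      let head := ((allowed.find? (fun d => decide (0 < d))).getD 0)
      let p2 := p * 10
      head * p2 + PySem.Int.floordiv (m * (p2 - 1)) 9

-- ===== PRECONDITION & SPEC =====
-- Pre_ excludes exactly the inputs on which A's search never succeeds (so A loops forever):
-- numbers using all ten digits and positive numbers using all nine nonzero digits.
def Pre_disjoint_set_of_digits (n : Int) : Prop :=
  n = 0 ∨ ∃ d ∈ Finset.range 10, (0 < n → 0 < d) ∧ d ∉ Nat.digits 10 n.natAbs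
instance (n : Int) : Decidable (Pre_disjoint_set_of_digits n) := by
  unfold Pre_disjoint_set_of_digits; infer_instance
def pvWitness_disjoint_set_of_digits : Int := 12

def Spec_disjoint_set_of_digits (n : Int) (out : Int) : Prop := out = disjoint_set_of_digits_alt n
instance (n : Int) (out : Int) : Decidable (Spec_disjoint_set_of_digits n out) := by
  unfold Spec_disjoint_set_of_digits; infer_instance

-- ===== CLAIM (what is proved, stated in full; the proofs are below) =====
def Claim_equal_disjoint_set_of_digits : Prop :=
  ∀ (n : Int), Dom_disjoint_set_of_digits n → Pre_disjoint_set_of_digits n →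
    Spec_disjoint_set_of_digits n (disjoint_set_of_digits n)

-- ===== LEMMAS AND PROOFS =====

-- v and n share no character of their decimal string forms (A's loop condition)
def pvDisj (v n : Int) : Prop := ∀ c ∈ PySem.Int.toChars v, c ∉ PySem.Int.toChars n

-- decimal digits (little-endian) of a nonnegative value as Python prints it (0 prints as "0")
def pvDigits (m : Nat) : List Nat := if m = 0 then [0] else Nat.digits 10 m

-- repunit 11…1 with k ones
def pvRep : Nat → Nat
  | 0 => 0
  | k+1 => 10 * pvRep k + 1

lemma pv_check_iff (xs ys : List Char) :
    (PySem.Set.len (PySem.Set.inter (PySem.Set.ofList xs) (PySem.Set.ofList ys)) = 0) ↔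
      ∀ c ∈ xs, c ∉ ys := by
  simp [PySem.Set.len, PySem.Set.inter, List.filter_eq_nil_iff, PySem.Set.mem_ofList,
    List.length_eq_zero_iff]

lemma pv_loopA_eq (n b : Int) : ∀ (fuel : Nat) (v : Int), v ≤ b →
    pvDisj b n → (∀ w, v ≤ w → w < b → ¬ pvDisj w n) → (b - v).toNat < fuel →
    pvLoopA n fuel v = b := by
  intro fuel
  induction fuel with
  | zero => intro v _ _ _ h; omega
  | succ fuel ih =>
    intro v hvb hgood hbad hfuel
    rw [pvLoopA]
    rcases eq_or_lt_of_le hvb with rfl | hlt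
    · rw [if_pos ((pv_check_iff _ _).mpr hgood)]
    · rw [if_neg (fun hc => hbad v le_rfl hlt ((pv_check_iff _ _).mp hc))]
      exact ih (v + 1) (by omega) hgood (fun w h1 h2 => hbad w (by omega) h2) (by omega)

lemma pv_toDigits10 (m : Nat) (hm : 0 < m) :
    Nat.toDigits 10 m = (Nat.digits 10 m).reverse.map Nat.digitChar := by
  induction m using Nat.strong_induction_on with
  | _ m ih =>
    rcases lt_or_ge m 10 with h | h
    · rw [Nat.toDigits_of_lt_base h, Nat.digits_def' (b := 10) (by norm_num) hm,
        Nat.mod_eq_of_lt h, Nat.div_eq_of_lt h]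
      simp
    · rw [Nat.toDigits_of_base_le (by norm_num) h, Nat.digits_def' (b := 10) (by norm_num) hm,
        ih (m / 10) (Nat.div_lt_self hm (by norm_num)) (by omega)]
      simp

lemma pv_toChars_nonneg (v : Int) (hv : 0 ≤ v) :
    PySem.Int.toChars v = (pvDigits v.toNat).reverse.map Nat.digitChar := by
  unfold pvDigits
  rw [PySem.Int.toChars, if_neg (by omega)]
  by_cases h : v.toNat = 0
  · simp [h, Nat.toDigits]
    rfl
  · rw [if_neg h, pv_toDigits10 _ (by omega)]

lemma pv_toChars_neg (v : Int) (hv : v < 0) :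
    PySem.Int.toChars v = '-' :: (Nat.digits 10 v.natAbs).reverse.map Nat.digitChar := by
  rw [PySem.Int.toChars, if_pos hv, pv_toDigits10 _ (by omega)]

lemma pv_digitChar_inj {a b : Nat} (ha : a < 10) (hb : b < 10)
    (h : Nat.digitChar a = Nat.digitChar b) : a = b := by
  have hf : ∀ x y : Fin 10, Nat.digitChar x = Nat.digitChar y → x = y := by decide
  have := hf ⟨a, ha⟩ ⟨b, hb⟩ h
  simpa using congrArg Fin.val this

lemma pv_digitChar_ne_dash {a : Nat} (ha : a < 10) : Nat.digitChar a ≠ '-' := by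
  have hf : ∀ x : Fin 10, Nat.digitChar x ≠ '-' := by decide
  exact hf ⟨a, ha⟩

lemma pv_pvDigits_lt {m d : Nat} (h : d ∈ pvDigits m) : d < 10 := by
  unfold pvDigits at h
  split at h
  · simp at h; omega
  · exact Nat.digits_lt_base (by norm_num) h

lemma pv_digits_natAbs (n : Int) (hn : n ≠ 0) : pvDigits n.natAbs = Nat.digits 10 n.natAbs := by
  unfold pvDigits
  rw [if_neg (by omega)]

lemma pv_mem_charlist (l : List Nat) (c : Char) :
    c ∈ l.reverse.map Nat.digitChar ↔ ∃ d ∈ l, c = Nat.digitChar d := by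
  simp [List.mem_map, eq_comm]

lemma pv_disj_iff (n v : Int) (hn : n ≠ 0) (hv : 0 ≤ v) :
    pvDisj v n ↔ ∀ d ∈ pvDigits v.toNat, d ∉ Nat.digits 10 n.natAbs := by
  unfold pvDisj
  rw [pv_toChars_nonneg v hv]
  have hchars : ∀ c, c ∈ PySem.Int.toChars n ↔
      (n < 0 ∧ c = '-') ∨ ∃ e ∈ Nat.digits 10 n.natAbs, c = Nat.digitChar e := by
    intro c
    rcases lt_or_ge n 0 with h | h
    · rw [pv_toChars_neg n h, List.mem_cons, pv_mem_charlist]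
      constructor
      · rintro (rfl | he)
        · exact Or.inl ⟨h, rfl⟩
        · exact Or.inr he
      · rintro (⟨_, rfl⟩ | he)
        · exact Or.inl rfl
        · exact Or.inr he
    · rw [pv_toChars_nonneg n h, pv_mem_charlist]
      have hna : n.toNat = n.natAbs := by omega
      rw [hna, pv_digits_natAbs n hn]
      constructor
      · exact fun he => Or.inr he
      · rintro (⟨hlt, _⟩ | he)
        · omega
        · exact he
  constructor
  · intro hd d hdv hdn
    have := hd (Nat.digitChar d) ((pv_mem_charlist _ _).mpr ⟨d, hdv, rfl⟩)
    exact this ((hchars _).mpr (Or.inr ⟨d, hdn, rfl⟩))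
  · intro hd c hc hcn
    obtain ⟨d, hdv, rfl⟩ := (pv_mem_charlist _ _).mp hc
    have hd10 : d < 10 := pv_pvDigits_lt hdv
    rcases (hchars _).mp hcn with ⟨_, hdash⟩ | ⟨e, hen, hee⟩
    · exact pv_digitChar_ne_dash hd10 hdash
    · have he10 : e < 10 := Nat.digits_lt_base (by norm_num) hen
      have : d = e := pv_digitChar_inj hd10 he10 hee
      exact hd d hdv (this ▸ hen)

lemma pv_not_disj_neg (n v : Int) (hn : n < 0) (hv : v < 0) : ¬ pvDisj v n := by
  intro h
  have h1 : '-' ∈ PySem.Int.toChars v := by rw [pv_toChars_neg v hv]; exact List.mem_cons_self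
  have h2 : '-' ∈ PySem.Int.toChars n := by rw [pv_toChars_neg n hn]; exact List.mem_cons_self
  exact h '-' h1 h2

lemma pv_pvDigits_single (k : Nat) (hk : k < 10) : pvDigits k = [k] := by
  unfold pvDigits
  by_cases h : k = 0
  · simp [h]
  · rw [if_neg h, Nat.digits_def' (b := 10) (by norm_num) (by omega),
      Nat.mod_eq_of_lt hk, Nat.div_eq_of_lt hk]
    simp

lemma pv_getElem_digits (m i : Nat) (h : i < (Nat.digits 10 m).length) :
    (Nat.digits 10 m)[i] = m / 10 ^ i % 10 := by
  have hd := Nat.self_div_pow_eq_ofDigits_drop (p := 10) i m (by norm_num)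
  rw [List.drop_eq_getElem_cons h] at hd
  rw [Nat.ofDigits_cons] at hd
  have hlt : (Nat.digits 10 m)[i] < 10 := Nat.digits_lt_base (by norm_num) (List.getElem_mem h)
  omega

lemma pv_mem_digits_iff (m d : Nat) :
    d ∈ Nat.digits 10 m ↔ ∃ i < (Nat.digits 10 m).length, d = m / 10 ^ i % 10 := by
  rw [List.mem_iff_getElem]
  constructor
  · rintro ⟨i, hi, rfl⟩; exact ⟨i, hi, pv_getElem_digits m i hi⟩
  · rintro ⟨i, hi, rfl⟩; exact ⟨i, hi, pv_getElem_digits m i hi⟩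

lemma pv_len_digits (j m : Nat) (h1 : 10 ^ j ≤ m) (h2 : m < 10 ^ (j+1)) :
    (Nat.digits 10 m).length = j + 1 := by
  have a := (Nat.digits_length_le_iff (b := 10) (by norm_num) m).mpr h2
  have b := (Nat.lt_digits_length_iff (b := 10) (by norm_num) m).mpr h1
  omega

lemma pv_top_mem (j m : Nat) (h1 : 10 ^ j ≤ m) (h2 : m < 10 ^ (j+1)) :
    m / 10 ^ j ∈ Nat.digits 10 m := by
  have hl := pv_len_digits j m h1 h2
  rw [pv_mem_digits_iff]
  refine ⟨j, by omega, ?_⟩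
  have : m / 10 ^ j < 10 := by
    rw [Nat.div_lt_iff_lt_mul (by positivity)]
    calc m < 10 ^ (j+1) := h2
    _ = 10 * 10 ^ j := by ring
    _ ≤ _ := by omega
  exact (Nat.mod_eq_of_lt this).symm

lemma pv_tail_dig (h r j i : Nat) (hi : i < j) :
    (h * 10 ^ j + r) / 10 ^ i % 10 = r / 10 ^ i % 10 := by
  have e1 : h * 10 ^ j + r = h * 10 ^ (j - i) * 10 ^ i + r := by
    have hji : j - i + i = j := by omega
    rw [mul_assoc, ← pow_add, hji]
  rw [e1, add_comm (h * 10 ^ (j - i) * 10 ^ i) r, Nat.add_mul_div_right _ _ (by positivity)]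
  have e2 : h * 10 ^ (j - i) = (h * 10 ^ (j - i - 1)) * 10 := by
    rw [mul_assoc]; congr 1; rw [← pow_succ]; congr 1; omega
  omega

lemma pv_ge_rep (k r m : Nat) (h : ∀ i < k, m ≤ r / 10 ^ i % 10) : m * pvRep k ≤ r := by
  induction k generalizing r with
  | zero => simp [pvRep]
  | succ k ih =>
    have h0 : m ≤ r % 10 := by simpa using h 0 (by omega)
    have hrec : m * pvRep k ≤ r / 10 := by
      apply ih
      intro i hi
      have := h (i+1) (by omega)
      rwa [pow_succ, mul_comm (10^i) 10, ← Nat.div_div_eq_div_mul] at this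
    have : m * pvRep (k+1) = 10 * (m * pvRep k) + m := by simp [pvRep]; ring
    omega

lemma pv_nine_rep (k : Nat) : 9 * pvRep k + 1 = 10 ^ k := by
  induction k with
  | zero => rfl
  | succ k ih => simp only [pvRep, pow_succ]; omega

lemma pv_rep_dig (m i j : Nat) (hm : m < 10) (hij : i < j) :
    (m * pvRep j) / 10 ^ i % 10 = m := by
  induction i generalizing j with
  | zero =>
    obtain ⟨j', rfl⟩ : ∃ j', j = j' + 1 := ⟨j - 1, by omega⟩
    simp only [pvRep, pow_zero, Nat.div_one]
    have : m * (10 * pvRep j' + 1) = (m * pvRep j') * 10 + m := by ring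
    omega
  | succ i ih =>
    obtain ⟨j', rfl⟩ : ∃ j', j = j' + 1 := ⟨j - 1, by omega⟩
    have e : m * pvRep (j' + 1) = (m * pvRep j') * 10 + m := by simp [pvRep]; ring
    rw [e, pow_succ, mul_comm (10 ^ i) 10, ← Nat.div_div_eq_div_mul]
    have e2 : (m * pvRep j' * 10 + m) / 10 = m * pvRep j' := by omega
    rw [e2]
    exact ih j' (by omega)

lemma pv_core_strip (head m j v : Nat) (hh0 : 0 < head) (hh9 : head < 10) (hm : m < 10)
    (hv1 : 10 ^ j ≤ v) (hv2 : v < head * 10 ^ j + m * pvRep j) :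
    (v / 10 ^ j < head ∧ v / 10 ^ j ∈ Nat.digits 10 v) ∨ (∃ d ∈ Nat.digits 10 v, d < m) := by
  have hrep : 9 * pvRep j + 1 = 10 ^ j := pv_nine_rep j
  have hmr : m * pvRep j ≤ 9 * pvRep j := Nat.mul_le_mul_right _ (by omega)
  have hh' : head * 10 ^ j ≤ 9 * 10 ^ j := Nat.mul_le_mul_right _ (by omega)
  have hv10 : v < 10 ^ (j + 1) := by
    have hps : 10 ^ (j+1) = 10 * 10 ^ j := by rw [pow_succ]; ring
    omega
  have htopmem := pv_top_mem j v hv1 hv10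
  have hlen := pv_len_digits j v hv1 hv10
  set t := v / 10 ^ j with ht
  have hdm : t * 10 ^ j + v % 10 ^ j = v := by rw [mul_comm]; exact Nat.div_add_mod v (10 ^ j)
  have hvmod : v % 10 ^ j < 10 ^ j := Nat.mod_lt v (by positivity)
  have htle : t ≤ head := by
    by_contra hc
    push Not at hc
    have h1 : (head + 1) * 10 ^ j ≤ t * 10 ^ j := Nat.mul_le_mul_right _ (by omega)
    have h2 : (head + 1) * 10 ^ j = head * 10 ^ j + 10 ^ j := by ring
    omega
  rcases Nat.lt_or_ge t head with hlt | hge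
  · exact Or.inl ⟨hlt, htopmem⟩
  · have hteq : t = head := by omega
    right
    set r := v % 10 ^ j with hr
    have hrlt : r < 10 ^ j := Nat.mod_lt v (by positivity)
    have hdm2 : head * 10 ^ j + r = v := by rw [← hteq]; exact hdm
    have hrm : r < m * pvRep j := by omega
    have hex : ∃ i < j, r / 10 ^ i % 10 < m := by
      by_contra hc
      push Not at hc
      exact absurd (pv_ge_rep j r m hc) (by omega)
    obtain ⟨i, hij, hdig⟩ := hex
    refine ⟨v / 10 ^ i % 10, ?_, ?_⟩
    · rw [pv_mem_digits_iff]; exact ⟨i, by omega, rfl⟩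
    · have := pv_tail_dig head r j i hij
      rw [hdm2] at this
      omega

lemma pv_good_digits (head m j : Nat) (hh0 : 0 < head) (hh9 : head < 10) (hm : m < 10) :
    ∀ d ∈ Nat.digits 10 (head * 10 ^ j + m * pvRep j), d = head ∨ d = m := by
  intro d hd
  set b := head * 10 ^ j + m * pvRep j with hb
  have hrep : 9 * pvRep j + 1 = 10 ^ j := pv_nine_rep j
  have hmr : m * pvRep j ≤ 9 * pvRep j := Nat.mul_le_mul_right _ (by omega)
  have hh' : head * 10 ^ j ≤ 9 * 10 ^ j := Nat.mul_le_mul_right _ (by omega)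
  have h1 : 10 ^ j ≤ b := by have := Nat.le_mul_of_pos_left (10 ^ j) hh0; omega
  have h2 : b < 10 ^ (j + 1) := by
    have hps : 10 ^ (j+1) = 10 * 10 ^ j := by rw [pow_succ]; ring
    omega
  have hlen := pv_len_digits j b h1 h2
  rw [pv_mem_digits_iff] at hd
  obtain ⟨i, hi, rfl⟩ := hd
  rcases Nat.lt_or_ge i j with hij | hij
  · right
    rw [pv_tail_dig head (m * pvRep j) j i hij]
    exact pv_rep_dig m i j hm hij
  · left
    have : i = j := by omega
    subst this
    have : b / 10 ^ i = head := by
      rw [hb, add_comm, Nat.add_mul_div_right _ _ (by positivity), Nat.div_eq_of_lt (by omega)]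
      omega
    rw [this, Nat.mod_eq_of_lt hh9]

lemma pv_min_same (N m0 h0 k W : Nat)
    (hpnN : 10 ^ k ≤ N) (hN10 : N < 10 ^ (k+1))
    (hh9 : h0 < 10) (hm9 : m0 < 10)
    (hlead_lt : N / 10 ^ k < h0)
    (hmused : ∀ d, d < m0 → d ∈ Nat.digits 10 N)
    (hbetween : ∀ t, N / 10 ^ k < t → t < h0 → t ∈ Nat.digits 10 N)
    (hW1 : N ≤ W) (hW2 : W < h0 * 10 ^ k + m0 * pvRep k) :
    ∃ d, d ∈ Nat.digits 10 W ∧ d ∈ Nat.digits 10 N := by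
  have hcs := pv_core_strip h0 m0 k W (lt_of_le_of_lt (Nat.zero_le _) hlead_lt) hh9 hm9
    (le_trans hpnN hW1) hW2
  rcases hcs with ⟨htl, htm⟩ | ⟨d, hdW, hdm⟩
  · have hge : N / 10 ^ k ≤ W / 10 ^ k := Nat.div_le_div_right hW1
    rcases Nat.eq_or_lt_of_le hge with heq | hlt
    · exact ⟨W / 10 ^ k, htm, heq ▸ pv_top_mem k N hpnN hN10⟩
    · exact ⟨W / 10 ^ k, htm, hbetween _ hlt htl⟩
  · exact ⟨d, hdW, hmused d hdm⟩

lemma pv_min_carry (N m0 h0 k W : Nat)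
    (hpnN : 10 ^ k ≤ N) (hN10 : N < 10 ^ (k+1))
    (hh0 : 0 < h0) (hh9 : h0 < 10) (hm9 : m0 < 10)
    (hmused : ∀ d, d < m0 → d ∈ Nat.digits 10 N)
    (habove : ∀ t, N / 10 ^ k < t → t < 10 → t ∈ Nat.digits 10 N)
    (hnzbelow : ∀ t, 0 < t → t < h0 → t ∈ Nat.digits 10 N)
    (hW1 : N ≤ W) (hW2 : W < h0 * 10 ^ (k+1) + m0 * pvRep (k+1)) :
    ∃ d, d ∈ Nat.digits 10 W ∧ d ∈ Nat.digits 10 N := by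
  rcases Nat.lt_or_ge W (10 ^ (k+1)) with hsm | hbg
  · have htm := pv_top_mem k W (le_trans hpnN hW1) hsm
    have ht10 : W / 10 ^ k < 10 := by
      rw [Nat.div_lt_iff_lt_mul (by positivity)]
      have : 10 ^ (k+1) = 10 * 10 ^ k := by rw [pow_succ]; ring
      omega
    have hge : N / 10 ^ k ≤ W / 10 ^ k := Nat.div_le_div_right hW1
    rcases Nat.eq_or_lt_of_le hge with heq | hlt
    · exact ⟨W / 10 ^ k, htm, heq ▸ pv_top_mem k N hpnN hN10⟩
    · exact ⟨W / 10 ^ k, htm, habove _ hlt ht10⟩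
  · have hcs := pv_core_strip h0 m0 (k+1) W hh0 hh9 hm9 hbg hW2
    rcases hcs with ⟨htl, htm⟩ | ⟨d, hdW, hdm⟩
    · have ht1 : 0 < W / 10 ^ (k+1) := Nat.div_pos hbg (by positivity)
      exact ⟨W / 10 ^ (k+1), htm, hnzbelow _ ht1 htl⟩
    · exact ⟨d, hdW, hmused d hdm⟩

lemma pv_mem_usedLoop : ∀ (k : Nat) (t : Int), 0 ≤ t → t.toNat = k →
    ∀ (s : PySem.Set Int) (x : Int),
    (x ∈ pvUsedLoop t s ↔ x ∈ s ∨ ∃ d ∈ Nat.digits 10 t.toNat, x = (d : Int)) := by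
  intro k
  induction k using Nat.strong_induction_on with
  | _ k ih =>
    intro t ht hk s x
    rw [pvUsedLoop]
    split
    · rename_i h0
      have htc : t = ((t.toNat : Nat) : Int) := by omega
      have hfd : PySem.Int.floordiv t 10 = ((t.toNat / 10 : Nat) : Int) := by
        rw [htc]; exact_mod_cast PySem.Int.floordiv_natCast t.toNat 10
      have hmd : PySem.Int.mod t 10 = ((t.toNat % 10 : Nat) : Int) := by
        rw [htc]; exact_mod_cast PySem.Int.mod_natCast t.toNat 10
      rw [hfd, hmd]
      have hm : t.toNat / 10 < k := by omega
      have ihh := ih (t.toNat / 10) hm ((t.toNat / 10 : Nat) : Int)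
        (by positivity) (by omega) (PySem.Set.add s ((t.toNat % 10 : Nat) : Int)) x
      simp only [Int.toNat_natCast] at ihh
      rw [ihh, PySem.Set.mem_add]
      rw [Nat.digits_def' (b := 10) (by norm_num) (n := t.toNat) (by omega)]
      simp only [List.mem_cons]
      constructor
      · rintro ((hx | hx) | ⟨d, hd, rfl⟩)
        · exact Or.inl hx
        · exact Or.inr ⟨t.toNat % 10, Or.inl rfl, hx⟩
        · exact Or.inr ⟨d, Or.inr hd, rfl⟩
      · rintro (hx | ⟨d, (rfl | hd), rfl⟩)
        · exact Or.inl (Or.inl hx)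
        · exact Or.inl (Or.inr rfl)
        · exact Or.inr ⟨d, hd, rfl⟩
    · rename_i h0
      have : t.toNat = 0 := by omega
      simp [this]

-- the 'allowed' list B builds, as a named object for the proofs
def pvAllowedL (n : Int) : List Int :=
  (PySem.List.pyRange 0 10).filter
    (fun d => !(PySem.Set.contains (pvUsedLoop |n| PySem.Set.empty) d))

lemma pv_mem_allowedL (n x : Int) :
    x ∈ pvAllowedL n ↔ ∃ d : Nat, d < 10 ∧ x = (d : Int) ∧ d ∉ Nat.digits 10 n.natAbs := by
  unfold pvAllowedL
  rw [List.mem_filter]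
  have hu := pv_mem_usedLoop (|n|).toNat |n| (abs_nonneg n) rfl PySem.Set.empty x
  have habs : (|n|).toNat = n.natAbs := by
    have h1 : |n| = (n.natAbs : Int) := Int.abs_eq_natAbs n
    omega
  rw [habs] at hu
  have hcont : (!(PySem.Set.contains (pvUsedLoop |n| PySem.Set.empty) x)) = true ↔
      ¬ (∃ d ∈ Nat.digits 10 n.natAbs, x = (d : Int)) := by
    rw [Bool.not_eq_eq_eq_not, Bool.not_true, ← Bool.not_eq_true,
      PySem.Set.contains_iff, hu]
    simp [PySem.Set.empty]
  rw [hcont]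
  have hr : PySem.List.pyRange 0 10 = [0,1,2,3,4,5,6,7,8,9] := by decide
  rw [hr]
  constructor
  · rintro ⟨hmem, hnot⟩
    have hx0 : 0 ≤ x ∧ x < 10 := by fin_cases hmem <;> norm_num
    refine ⟨x.toNat, by omega, by omega, fun hd => hnot ⟨x.toNat, hd, by omega⟩⟩
  · rintro ⟨d, hd10, rfl, hnd⟩
    constructor
    · interval_cases d <;> simp
    · rintro ⟨e, he, hxe⟩
      have : e = d := by omega
      exact hnd (this ▸ he)

lemma pv_pairwise_allowedL (n : Int) : (pvAllowedL n).Pairwise (· < ·) := by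
  unfold pvAllowedL
  apply List.Pairwise.filter
  have hr : PySem.List.pyRange 0 10 = [0,1,2,3,4,5,6,7,8,9] := by decide
  rw [hr]
  decide

lemma pv_allowed_head_min (n : Int) {a : Int} {rest : List Int}
    (h : pvAllowedL n = a :: rest) : ∀ x ∈ pvAllowedL n, a ≤ x := by
  intro x hx
  rw [h] at hx
  rcases List.mem_cons.mp hx with rfl | hx
  · exact le_refl x
  · have hp := pv_pairwise_allowedL n
    rw [h] at hp
    exact le_of_lt (List.rel_of_pairwise_cons hp hx)

lemma pv_find_min {p : Int → Bool} : ∀ {l : List Int}, l.Pairwise (· < ·) → ∀ {a : Int},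
    l.find? p = some a → ∀ x ∈ l, p x → a ≤ x := by
  intro l
  induction l with
  | nil => intro _ a h; simp at h
  | cons b l ih =>
    intro hp a hf x hx hpx
    by_cases hpb : p b = true
    · simp only [List.find?_cons, hpb, Option.some.injEq] at hf
      subst hf
      rcases List.mem_cons.mp hx with rfl | hx
      · exact le_refl x
      · exact le_of_lt (List.rel_of_pairwise_cons hp hx)
    · rw [Bool.not_eq_true] at hpb
      simp only [List.find?_cons, hpb] at hf
      rcases List.mem_cons.mp hx with rfl | hx
      · exact absurd hpx (by simp [hpb])
      · exact ih hp.of_cons hf x hx hpx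

lemma pv_powLoop (n : Int) : ∀ (k : Nat) (p : Int), 0 < p → p ≤ n → (n + 1 - p).toNat = k →
    ∃ j : Nat, pvPowLoop n p = p * 10 ^ j ∧ pvPowLoop n p ≤ n ∧ n < 10 * pvPowLoop n p := by
  intro k
  induction k using Nat.strong_induction_on with
  | _ k ih =>
    intro p hp hpn hk
    rw [pvPowLoop]
    split
    · rename_i h0
      obtain ⟨j, hj1, hj2, hj3⟩ := ih (n + 1 - p * 10).toNat (by omega) (p * 10)
        (by omega) (by omega) rfl
      exact ⟨j + 1, by rw [hj1]; ring, hj2, hj3⟩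
    · rename_i h0
      exact ⟨0, by ring, hpn, by omega⟩

lemma pv_B_neg_eq (n : Int) (h0 : ¬ n = 0) (hn : n < 0) :
    disjoint_set_of_digits_alt n = PySem.List.pyGetD (pvAllowedL n) 0 0 := by
  unfold disjoint_set_of_digits_alt pvAllowedL
  rw [if_neg h0]
  simp only []
  rw [if_pos hn]

lemma pv_B_pos_eq (n : Int) (h0 : ¬ n = 0) (hn : ¬ n < 0) :
    disjoint_set_of_digits_alt n =
      (let allowed := pvAllowedL n
       let m := PySem.List.pyGetD allowed 0 0
       let p := pvPowLoop n 1
       let lead := PySem.Int.floordiv n p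
       match allowed.find? (fun d => decide (lead < d)) with
       | some head => head * p + PySem.Int.floordiv (m * (p - 1)) 9
       | none =>
         ((allowed.find? (fun d => decide (0 < d))).getD 0) * (p * 10) +
           PySem.Int.floordiv (m * (p * 10 - 1)) 9) := by
  unfold disjoint_set_of_digits_alt pvAllowedL
  rw [if_neg h0]
  simp only []
  rw [if_neg hn]

lemma pv_B_neg (n : Int) (hn : n < 0) (hpre : Pre_disjoint_set_of_digits n) :
    n ≤ disjoint_set_of_digits_alt n ∧ disjoint_set_of_digits_alt n ≤ 9 ∧
    pvDisj (disjoint_set_of_digits_alt n) n ∧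
    ∀ w, n ≤ w → w < disjoint_set_of_digits_alt n → ¬ pvDisj w n := by
  have hn0 : ¬ n = 0 := by omega
  rcases hpre with h | ⟨d0, hd0r, _, hd0f⟩
  · omega
  have hd0 : d0 < 10 := Finset.mem_range.mp hd0r
  have hmem : (d0 : Int) ∈ pvAllowedL n := (pv_mem_allowedL n _).mpr ⟨d0, hd0, rfl, hd0f⟩
  obtain ⟨a, rest, hcons⟩ : ∃ a rest, pvAllowedL n = a :: rest := by
    cases h : pvAllowedL n with
    | nil => rw [h] at hmem; simp at hmem
    | cons a rest => exact ⟨a, rest, rfl⟩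
  have hBa : disjoint_set_of_digits_alt n = a := by
    rw [pv_B_neg_eq n hn0 hn, hcons, PySem.List.pyGetD_zero_cons]
  obtain ⟨a0, ha0, haa, ha0f⟩ := (pv_mem_allowedL n a).mp (hcons ▸ List.mem_cons_self)
  have hmin := pv_allowed_head_min n hcons
  subst haa
  rw [hBa]
  refine ⟨by omega, by omega, ?_, ?_⟩
  · rw [pv_disj_iff n _ hn0 (by omega)]
    intro d hd
    rw [Int.toNat_natCast, pv_pvDigits_single a0 ha0] at hd
    simp at hd
    subst hd
    exact ha0f
  · intro w hw1 hw2 hdisj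
    rcases lt_or_ge w 0 with hwneg | hwpos
    · exact pv_not_disj_neg n w hn hwneg hdisj
    · rw [pv_disj_iff n w hn0 hwpos] at hdisj
      have hw10 : w.toNat < 10 := by omega
      have := hdisj w.toNat (by rw [pv_pvDigits_single _ hw10]; simp)
      have hwal : (w.toNat : Int) ∈ pvAllowedL n := (pv_mem_allowedL n _).mpr ⟨w.toNat, hw10, rfl, this⟩
      have := hmin _ hwal
      omega

lemma pv_B_pos (n : Int) (hn : 0 < n) (hpre : Pre_disjoint_set_of_digits n) :
    n ≤ disjoint_set_of_digits_alt n ∧ disjoint_set_of_digits_alt n ≤ 100 * n ∧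
    pvDisj (disjoint_set_of_digits_alt n) n ∧
    ∀ w, n ≤ w → w < disjoint_set_of_digits_alt n → ¬ pvDisj w n := by
  have hn0 : ¬ n = 0 := by omega
  have hnlt : ¬ n < 0 := by omega
  set N := n.toNat with hNdef
  have hNn : (N : Int) = n := Int.toNat_of_nonneg (by omega)
  have hN : 0 < N := by omega
  have hnatabs : n.natAbs = N := by omega
  rcases hpre with h | ⟨d0, hd0r, hd0z, hd0f⟩
  · omega
  have hd0 : d0 < 10 := Finset.mem_range.mp hd0r
  rw [hnatabs] at hd0f
  have hd0z' : 0 < d0 := hd0z hn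
  have hmemA : ∀ x : Int, x ∈ pvAllowedL n ↔
      ∃ d : Nat, d < 10 ∧ x = (d : Int) ∧ d ∉ Nat.digits 10 N := by
    intro x; rw [pv_mem_allowedL, hnatabs]
  have hd0mem : (d0 : Int) ∈ pvAllowedL n := (hmemA _).mpr ⟨d0, hd0, rfl, hd0f⟩
  obtain ⟨a, rest, hcons⟩ : ∃ a rest, pvAllowedL n = a :: rest := by
    cases h : pvAllowedL n with
    | nil => rw [h] at hd0mem; simp at hd0mem
    | cons a rest => exact ⟨a, rest, rfl⟩
  obtain ⟨m0, hm0lt, rfl, hm0f⟩ := (hmemA a).mp (hcons ▸ List.mem_cons_self)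
  have hmin := pv_allowed_head_min n hcons
  have hmused : ∀ d : Nat, d < m0 → d ∈ Nat.digits 10 N := by
    intro d hd
    by_contra hfree
    have hmm : (d : Int) ∈ pvAllowedL n := (hmemA _).mpr ⟨d, by omega, rfl, hfree⟩
    have := hmin _ hmm
    omega
  obtain ⟨k, hp1, hp2, hp3⟩ := pv_powLoop n (n + 1 - 1).toNat 1 one_pos (by omega) rfl
  set pn : Nat := 10 ^ k with hpndef
  have hp : pvPowLoop n 1 = (pn : Int) := by rw [hp1, hpndef]; push_cast; ring
  have hpn0 : 0 < pn := by positivity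
  have hpnN : pn ≤ N := by rw [hp] at hp2; omega
  have hpow1 : (10:Nat) ^ (k+1) = 10 * pn := by rw [hpndef, pow_succ]; ring
  have hN10 : N < 10 ^ (k + 1) := by rw [hp] at hp3; omega
  set leadN : Nat := N / pn with hleaddef
  have hlead2 : PySem.Int.floordiv n ((pn : Nat) : Int) = ((leadN : Nat) : Int) := by
    rw [← hNn, PySem.Int.floordiv_natCast]
  have hlead9 : leadN < 10 := by
    rw [hleaddef, Nat.div_lt_iff_lt_mul hpn0]; omega
  have hlead1 : 1 ≤ leadN := by
    rw [hleaddef, Nat.le_div_iff_mul_le hpn0]; omega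
  have hleadmem : leadN ∈ Nat.digits 10 N := pv_top_mem k N hpnN hN10
  have hdm : leadN * pn + N % pn = N := by
    rw [hleaddef, mul_comm]; exact Nat.div_add_mod N pn
  have hmodlt : N % pn < pn := Nat.mod_lt N hpn0
  rw [pv_B_pos_eq n hn0 hnlt]
  simp only [hp, hlead2, hcons, PySem.List.pyGetD_zero_cons]
  cases hfind : ((m0 : Int) :: rest).find? (fun d => decide (((leadN : Nat) : Int) < d)) with
  | some head =>
    dsimp only
    rw [← hcons] at hfind
    have hheadmem := List.mem_of_find?_eq_some hfind
    obtain ⟨h0, hh010, rfl, hh0f⟩ := (hmemA head).mp hheadmem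
    have hpred := List.find?_some hfind
    have hlth : leadN < h0 := by simp at hpred; exact_mod_cast hpred
    have hfmin := pv_find_min (pv_pairwise_allowedL n) hfind
    have hbetween : ∀ t : Nat, leadN < t → t < h0 → t ∈ Nat.digits 10 N := by
      intro t ht1 ht2
      by_contra hfree
      have hmm : (t : Int) ∈ pvAllowedL n := (hmemA _).mpr ⟨t, by omega, rfl, hfree⟩
      have := hfmin _ hmm (by simp; exact_mod_cast ht1)
      omega
    set b : Nat := h0 * pn + m0 * pvRep k with hbdef
    have hreple : 9 * pvRep k + 1 = pn := pv_nine_rep k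
    have hval : ((h0 : Nat) : Int) * (pn : Int) +
        PySem.Int.floordiv ((m0 : Int) * ((pn : Int) - 1)) 9 = (b : Int) := by
      have hpn1 : ((pn : Int)) - 1 = ((9 * pvRep k : Nat) : Int) := by push_cast; omega
      rw [hpn1, show ((m0:Int) * ((9 * pvRep k : Nat) : Int)) = ((m0 * (9 * pvRep k) : Nat) : Int) by push_cast; ring,
        show (9:Int) = ((9:Nat):Int) from rfl, PySem.Int.floordiv_natCast]
      have h2 : m0 * (9 * pvRep k) / 9 = m0 * pvRep k := by
        rw [show m0 * (9 * pvRep k) = 9 * (m0 * pvRep k) by ring]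
        exact Nat.mul_div_cancel_left _ (by norm_num)
      rw [h2, hbdef]
      push_cast; ring
    rw [hval]
    have hm9 : m0 * pvRep k ≤ 9 * pvRep k := Nat.mul_le_mul_right _ (by omega)
    have hh0pn : (leadN + 1) * pn ≤ h0 * pn := Nat.mul_le_mul_right _ (by omega)
    have hexp : (leadN + 1) * pn = leadN * pn + pn := by ring
    have hh0pn9 : h0 * pn ≤ 9 * pn := Nat.mul_le_mul_right _ (by omega)
    have hNb : N ≤ b := by omega
    have hb100 : b ≤ 100 * N := by omega
    have hbpos : b ≠ 0 := by omega
    refine ⟨by omega, by omega, ?_, ?_⟩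
    · rw [pv_disj_iff n _ hn0 (by positivity)]
      intro d hd hdN
      rw [Int.toNat_natCast] at hd
      rw [hnatabs] at hdN
      unfold pvDigits at hd
      rw [if_neg hbpos] at hd
      rcases pv_good_digits h0 m0 k (by omega) hh010 hm0lt d hd with rfl | rfl
      · exact hh0f hdN
      · exact hm0f hdN
    · intro w hw1 hw2 hdisj
      have hw0 : 0 ≤ w := by omega
      rw [pv_disj_iff n w hn0 hw0] at hdisj
      set W := w.toNat with hWdef
      have hNW : N ≤ W := by omega
      have hWb : W < b := by omega
      obtain ⟨d, hdW, hdN⟩ := pv_min_same N m0 h0 k W hpnN hN10 hh010 hm0lt hlth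
        hmused hbetween hNW hWb
      have hW0 : W ≠ 0 := by omega
      exact hdisj d (by unfold pvDigits; rw [if_neg hW0]; exact hdW) (hnatabs ▸ hdN)
  | none =>
    rw [← hcons] at hfind
    have hnone := List.find?_eq_none.mp hfind
    have habove : ∀ t : Nat, leadN < t → t < 10 → t ∈ Nat.digits 10 N := by
      intro t ht1 ht2
      by_contra hfree
      have hmm : (t : Int) ∈ pvAllowedL n := (hmemA _).mpr ⟨t, ht2, rfl, hfree⟩
      have := hnone _ hmm
      simp at this
      omega
    cases hf2 : ((m0 : Int) :: rest).find? (fun d => decide ((0:Int) < d)) with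
    | none =>
      exfalso
      rw [← hcons] at hf2
      have := List.find?_eq_none.mp hf2 _ hd0mem
      simp at this
      omega
    | some head =>
      rw [← hcons] at hf2
      have hheadmem := List.mem_of_find?_eq_some hf2
      obtain ⟨h0, hh010, rfl, hh0f⟩ := (hmemA head).mp hheadmem
      have hpred := List.find?_some hf2
      have hh0pos : 0 < h0 := by simp at hpred; exact_mod_cast hpred
      have hfmin := pv_find_min (pv_pairwise_allowedL n) hf2
      have hnzbelow : ∀ t : Nat, 0 < t → t < h0 → t ∈ Nat.digits 10 N := by
        intro t ht1 ht2
        by_contra hfree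
        have hmm : (t : Int) ∈ pvAllowedL n := (hmemA _).mpr ⟨t, by omega, rfl, hfree⟩
        have := hfmin _ hmm (by simp; exact_mod_cast ht1)
        omega
      set q : Nat := 10 ^ (k + 1) with hqdef
      have hq0 : 0 < q := by positivity
      have hqq : q = 10 * pn := hpow1
      set b : Nat := h0 * q + m0 * pvRep (k+1) with hbdef
      have hrepq : 9 * pvRep (k+1) + 1 = q := pv_nine_rep (k+1)
      have hval : ((h0 : Nat) : Int) * ((pn : Int) * 10) +
          PySem.Int.floordiv ((m0 : Int) * ((pn : Int) * 10 - 1)) 9 = (b : Int) := by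
        have hqc : ((pn : Int) * 10) = ((q : Nat) : Int) := by rw [hqq]; push_cast; ring
        rw [hqc]
        have hq1 : ((q : Int)) - 1 = ((9 * pvRep (k+1) : Nat) : Int) := by push_cast; omega
        rw [hq1, show ((m0:Int) * ((9 * pvRep (k+1) : Nat) : Int)) = ((m0 * (9 * pvRep (k+1)) : Nat) : Int) by push_cast; ring,
          show (9:Int) = ((9:Nat):Int) from rfl, PySem.Int.floordiv_natCast]
        have h2 : m0 * (9 * pvRep (k+1)) / 9 = m0 * pvRep (k+1) := by
          rw [show m0 * (9 * pvRep (k+1)) = 9 * (m0 * pvRep (k+1)) by ring]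
          exact Nat.mul_div_cancel_left _ (by norm_num)
        rw [h2, hbdef]
        push_cast; ring
      dsimp only
      rw [Option.getD_some, hval]
      have hm9 : m0 * pvRep (k+1) ≤ 9 * pvRep (k+1) := Nat.mul_le_mul_right _ (by omega)
      have hh0q : 1 * q ≤ h0 * q := Nat.mul_le_mul_right _ (by omega)
      have hh0q9 : h0 * q ≤ 9 * q := Nat.mul_le_mul_right _ (by omega)
      have hNb : N ≤ b := by omega
      have hb100 : b ≤ 100 * N := by omega
      have hbpos : b ≠ 0 := by omega
      refine ⟨by omega, by omega, ?_, ?_⟩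
      · rw [pv_disj_iff n _ hn0 (by positivity)]
        intro d hd hdN
        rw [Int.toNat_natCast] at hd
        rw [hnatabs] at hdN
        unfold pvDigits at hd
        rw [if_neg hbpos] at hd
        rcases pv_good_digits h0 m0 (k+1) hh0pos hh010 hm0lt d hd with rfl | rfl
        · exact hh0f hdN
        · exact hm0f hdN
      · intro w hw1 hw2 hdisj
        have hw0 : 0 ≤ w := by omega
        rw [pv_disj_iff n w hn0 hw0] at hdisj
        set W := w.toNat with hWdef
        have hNW : N ≤ W := by omega
        have hWb : W < b := by omega
        obtain ⟨d, hdW, hdN⟩ := pv_min_carry N m0 h0 k W hpnN hN10 hh0pos hh010 hm0lt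
          hmused habove hnzbelow hNW hWb
        have hW0 : W ≠ 0 := by omega
        exact hdisj d (by unfold pvDigits; rw [if_neg hW0]; exact hdW) (hnatabs ▸ hdN)


-- ===== VERDICT (by name: the statement is the Claim_ definition above) =====
theorem disjoint_set_of_digits_spec : Claim_equal_disjoint_set_of_digits := by
  intro n hdom hpre
  unfold Spec_disjoint_set_of_digits
  unfold Dom_disjoint_set_of_digits pvDomInt at hdom
  rw [decide_eq_true_eq] at hdom
  unfold disjoint_set_of_digits
  by_cases h0 : n = 0
  · subst h0
    rw [if_pos rfl]
    rfl
  · rw [if_neg h0]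
    rcases lt_trichotomy n 0 with hneg | rfl | hpos
    · obtain ⟨h1, h2, h3, h4⟩ := pv_B_neg n hneg hpre
      exact pv_loopA_eq n _ 1000000000000 n h1 h3 h4 (by omega)
    · exact absurd rfl h0
    · obtain ⟨h1, h2, h3, h4⟩ := pv_B_pos n hpos hpre
      exact pv_loopA_eq n _ 1000000000000 n h1 h3 h4 (by omega)
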